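-- pv_equiv track=rewrite | github.com/anselmotalotta/personal-timeline | src/common/services/memory_resurfacing_service.py | _emotions_are_similar
-- ===== SOURCE A (Python) =====
-- def _emotions_are_similar(emotion1: str, emotion2: str) -> bool:
--     """Check if two emotions are similar"""
--     emotion_groups = {
--         'positive': ['joy', 'happiness', 'excitement', 'gratitude', 'love', 'peace'],
--         'contemplative': ['curiosity', 'wonder', 'thoughtful', 'reflective'],
--         'energetic': ['excitement', 'enthusiasm', 'motivated'],
--         'calm': ['peace', 'contentment', 'serene', 'peaceful']
--     }
--
--     for group in emotion_groups.values():
--         if emotion1 in group and emotion2 in group: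
--             return True
--     return False
-- ===== SOURCE B (Python) =====
-- def _emotions_are_similar(emotion1: str, emotion2: str) -> bool:
--     """Check if two emotions are similar"""
--     groups = [
--         ['joy', 'happiness', 'excitement', 'gratitude', 'love', 'peace'],
--         ['curiosity', 'wonder', 'thoughtful', 'reflective'],
--         ['excitement', 'enthusiasm', 'motivated'],
--         ['peace', 'contentment', 'serene', 'peaceful'],
--     ]
--     mask1 = mask2 = 0
--     for i, members in enumerate(groups):
--         if emotion1 in members:
--             mask1 |= 1 << i
--         if emotion2 in members:
--             mask2 |= 1 << i
--     return (mask1 & mask2) != 0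
-- ===== Notes on version B (the rewrite author's own statement) =====
-- stated objective: alternative
-- what changed: Instead of scanning groups with a per-group two-way membership conjunction and an early return, B encodes each emotion's group memberships as an integer bitmask in one pass and answers with a bitwise AND test.
import Mathlib
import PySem

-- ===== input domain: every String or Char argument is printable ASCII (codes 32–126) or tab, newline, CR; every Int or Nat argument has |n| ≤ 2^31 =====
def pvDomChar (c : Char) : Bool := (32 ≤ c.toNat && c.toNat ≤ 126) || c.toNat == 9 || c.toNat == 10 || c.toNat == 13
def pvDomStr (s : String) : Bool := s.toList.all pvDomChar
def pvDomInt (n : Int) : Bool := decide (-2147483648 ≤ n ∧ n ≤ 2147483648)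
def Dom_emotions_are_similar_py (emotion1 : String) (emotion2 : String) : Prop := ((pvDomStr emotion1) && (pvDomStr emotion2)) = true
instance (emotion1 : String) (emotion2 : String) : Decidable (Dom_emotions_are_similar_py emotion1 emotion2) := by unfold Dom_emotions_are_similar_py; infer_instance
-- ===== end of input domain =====

-- B replaces A's early-return per-group conjunction scan with one pass building two group-membership bitmasks tested by bitwise AND; objective: alternative.


-- ===== PORT A =====
-- the literal emotion_groups dict of A (values in insertion order)
def pvGroupsA : List (String × List String) :=
  [("positive", ["joy", "happiness", "excitement", "gratitude", "love", "peace"]),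
   ("contemplative", ["curiosity", "wonder", "thoughtful", "reflective"]),
   ("energetic", ["excitement", "enthusiasm", "motivated"]),
   ("calm", ["peace", "contentment", "serene", "peaceful"])]

-- 'for group in emotion_groups.values(): if …: return True' / 'return False'
def pvScanA (gs : List (List String)) (emotion1 : String) (emotion2 : String) : Bool :=
  match gs with
  | [] => false
  | g :: rest =>
    if g.contains emotion1 && g.contains emotion2 then true
    else pvScanA rest emotion1 emotion2

def emotions_are_similar_py (emotion1 : String) (emotion2 : String) : Bool :=
  pvScanA (pvGroupsA.map Prod.snd) emotion1 emotion2

-- ===== PORT B =====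
-- B's plain list of groups (it drops the unused names)
def pvGroupsB : List (List String) :=
  [["joy", "happiness", "excitement", "gratitude", "love", "peace"],
   ["curiosity", "wonder", "thoughtful", "reflective"],
   ["excitement", "enthusiasm", "motivated"],
   ["peace", "contentment", "serene", "peaceful"]]

-- 'for i, members in enumerate(groups): …' accumulating (mask1, mask2); indices are 0..3 so i.toNat is exact for '1 << i'
def emotions_are_similar_py_alt (emotion1 : String) (emotion2 : String) : Bool :=
  let masks := (PySem.List.enumerate pvGroupsB).foldl
    (fun (acc : Int × Int) (p : Int × List String) =>
      (if p.2.contains emotion1 then PySem.Int.bor acc.1 ((1 : Int) <<< p.1.toNat) else acc.1,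
       if p.2.contains emotion2 then PySem.Int.bor acc.2 ((1 : Int) <<< p.1.toNat) else acc.2))
    (0, 0)
  PySem.Int.band masks.1 masks.2 != 0

-- ===== PRECONDITION & SPEC =====
def Spec_emotions_are_similar_py (emotion1 : String) (emotion2 : String) (out : Bool) : Prop := out = emotions_are_similar_py_alt emotion1 emotion2
instance (emotion1 : String) (emotion2 : String) (out : Bool) : Decidable (Spec_emotions_are_similar_py emotion1 emotion2 out) := by unfold Spec_emotions_are_similar_py; infer_instance

-- ===== CLAIM =====
def Claim_equal_emotions_are_similar_py : Prop := ∀ (emotion1 : String) (emotion2 : String), Dom_emotions_are_similar_py emotion1 emotion2 → Spec_emotions_are_similar_py emotion1 emotion2 (emotions_are_similar_py emotion1 emotion2)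

-- ===== LEMMAS AND PROOFS =====

-- ===== VERDICT =====
set_option maxHeartbeats 1000000 in
theorem emotions_are_similar_py_spec : Claim_equal_emotions_are_similar_py := by
  intro e1 e2 _
  unfold Spec_emotions_are_similar_py
  cases h1 : (["joy", "happiness", "excitement", "gratitude", "love", "peace"] : List String).contains e1 <;>
  cases h2 : (["curiosity", "wonder", "thoughtful", "reflective"] : List String).contains e1 <;>
  cases h3 : (["excitement", "enthusiasm", "motivated"] : List String).contains e1 <;>
  cases h4 : (["peace", "contentment", "serene", "peaceful"] : List String).contains e1 <;>
  cases h5 : (["joy", "happiness", "excitement", "gratitude", "love", "peace"] : List String).contains e2 <;>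
  cases h6 : (["curiosity", "wonder", "thoughtful", "reflective"] : List String).contains e2 <;>
  cases h7 : (["excitement", "enthusiasm", "motivated"] : List String).contains e2 <;>
  cases h8 : (["peace", "contentment", "serene", "peaceful"] : List String).contains e2 <;>
  simp only [emotions_are_similar_py, emotions_are_similar_py_alt, pvScanA,
    pvGroupsA, pvGroupsB, List.map_cons, List.map_nil,
    PySem.List.enumerate_cons, PySem.List.enumerate_nil, List.foldl_cons, List.foldl_nil,
    h1, h2, h3, h4, h5, h6, h7, h8,
    Bool.and_true, Bool.and_false, if_true] <;> decide
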